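-- pv_equiv track=rewrite | github.com/seligman/microkeys | get_micropython.py | fix_objfun
-- ===== SOURCE A (Python) =====
-- def fix_objfun(data):
--     if data is None:
--         return "py/objfun.c"
--
--     todo = []
--     data = data.split("\n")
--     found = {}
--
--     for i, line in enumerate(data):
--         if "#if MICROPY_EMIT_NATIVE" in line:
--             found["native"] = found.get("native", 0) + 1
--             if found["native"] == 3:
--                 todo.append((i, "native"))
--
--     todo.sort(reverse=True)
--     for i, patch in todo:
--         if patch == "native":
--             data[i] = data[i].replace("#if MICROPY_EMIT_NATIVE", "#if MICROPY_EMIT_NATIVE || 1")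
--
--     return "\n".join(data)
-- ===== SOURCE B (Python) =====
-- def fix_objfun(data):
--     if data is None:
--         return "py/objfun.c"
--
--     out = []
--     seen = 0
--     for line in data.split("\n"):
--         if "#if MICROPY_EMIT_NATIVE" in line:
--             seen += 1
--             if seen == 3:
--                 line = line.replace("#if MICROPY_EMIT_NATIVE",
--                                     "#if MICROPY_EMIT_NATIVE || 1")
--         out.append(line)
--     return "\n".join(out)
-- ===== Notes on version B (the rewrite author's own statement) =====
-- stated objective: simpler
-- what changed: A stages the work (scan collecting indices into a todo list via a counter dict, reverse-sort the todo, then mutate the line list in place by index); B is a single streaming pass that patches the third matching line inline while emitting the output list, with no indices, no todo list, no sort and no mutation.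
import Mathlib
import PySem

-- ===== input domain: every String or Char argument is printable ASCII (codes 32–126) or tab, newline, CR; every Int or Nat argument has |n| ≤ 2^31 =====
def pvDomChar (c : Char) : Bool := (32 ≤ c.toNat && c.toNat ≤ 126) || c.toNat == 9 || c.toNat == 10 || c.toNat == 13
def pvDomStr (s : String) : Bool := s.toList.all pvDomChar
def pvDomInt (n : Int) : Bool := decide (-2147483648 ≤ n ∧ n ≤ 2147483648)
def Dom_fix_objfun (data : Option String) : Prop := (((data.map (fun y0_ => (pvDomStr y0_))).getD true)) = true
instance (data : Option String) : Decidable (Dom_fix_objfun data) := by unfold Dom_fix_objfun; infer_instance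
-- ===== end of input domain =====

-- B replaces A's staged pipeline (index-collecting scan with a counter dict and todo list,
-- reverse sort, in-place patch loop by index) by one streaming pass that patches the third
-- matching line inline while building the output list (objective: simpler).

-- ===== PORT A =====
-- literal transliteration of A: enumerate loop with a counter dict and a todo list,
-- todo.sort(reverse=True), then a patch loop doing data[i] = data[i].replace(...)
-- (indices in todo come from enumerate, hence are in range: pyGetD/pySetD are exact here)
def fix_objfun (data : Option String) : String :=
  match data with
  | none => "py/objfun.c"
  | some d =>
    let lines := (PySem.Str.split? d "\n").getD []  -- sep "\n" is non-empty, split? is some here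
    let st := (PySem.List.enumerate lines).foldl
      (fun (st : List (Int × String) × PySem.Dict String Int) p =>
        if PySem.Str.isIn "#if MICROPY_EMIT_NATIVE" p.2 then
          let found := st.2.insert "native" (st.2.getD "native" 0 + 1)
          if found.getD "native" 0 == 3 then (st.1 ++ [(p.1, "native")], found)
          else (st.1, found)
        else st)
      ([], PySem.Dict.empty)
    let todo := PySem.List.sorted2 st.1 Prod.fst Prod.snd true
    let lines := todo.foldl
      (fun (ls : List String) p =>
        if p.2 == "native" then
          PySem.List.pySetD ls p.1
            (PySem.Str.replace (PySem.List.pyGetD ls p.1 "")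
              "#if MICROPY_EMIT_NATIVE" "#if MICROPY_EMIT_NATIVE || 1")
        else ls) lines
    PySem.Str.join "\n" lines

-- ===== PORT B =====
-- literal transliteration of Source B: one pass over the lines carrying (out, seen); a matching
-- line bumps seen and is emitted patched exactly when seen == 3; join the emitted list
def fix_objfun_alt (data : Option String) : String :=
  match data with
  | none => "py/objfun.c"
  | some d =>
    let st := ((PySem.Str.split? d "\n").getD []).foldl
      (fun (st : List String × Int) line =>
        if PySem.Str.isIn "#if MICROPY_EMIT_NATIVE" line then
          let seen := st.2 + 1
          let line := if seen == 3 then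
              PySem.Str.replace line "#if MICROPY_EMIT_NATIVE" "#if MICROPY_EMIT_NATIVE || 1"
            else line
          (st.1 ++ [line], seen)
        else (st.1 ++ [line], st.2))
      ([], 0)
    PySem.Str.join "\n" st.1

-- ===== PRECONDITION & SPEC =====
def Spec_fix_objfun (data : Option String) (out : String) : Prop := out = fix_objfun_alt data
instance (data : Option String) (out : String) : Decidable (Spec_fix_objfun data out) := by unfold Spec_fix_objfun; infer_instance

-- ===== CLAIM (what is proved, stated in full; the proofs are below) =====
def Claim_equal_fix_objfun : Prop := ∀ (data : Option String), Dom_fix_objfun data → Spec_fix_objfun data (fix_objfun data)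

-- ===== LEMMAS AND PROOFS =====

-- A's loop body, named for the lemmas
def pvStepA (st : List (Int × String) × PySem.Dict String Int) (p : Int × String) :
    List (Int × String) × PySem.Dict String Int :=
  if PySem.Str.isIn "#if MICROPY_EMIT_NATIVE" p.2 then
    let found := st.2.insert "native" (st.2.getD "native" 0 + 1)
    if found.getD "native" 0 == 3 then (st.1 ++ [(p.1, "native")], found)
    else (st.1, found)
  else st

-- B's loop body, named for the lemmas
def pvStepB (st : List String × Int) (line : String) : List String × Int :=
  if PySem.Str.isIn "#if MICROPY_EMIT_NATIVE" line then
    let seen := st.2 + 1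
    let line := if seen == 3 then
        PySem.Str.replace line "#if MICROPY_EMIT_NATIVE" "#if MICROPY_EMIT_NATIVE || 1"
      else line
    (st.1 ++ [line], seen)
  else (st.1 ++ [line], st.2)

-- the matching indices of an enumerated segment (A side)
def pvM (ps : List (Int × String)) : List Int :=
  (ps.filter (fun p => PySem.Str.isIn "#if MICROPY_EMIT_NATIVE" p.2)).map Prod.fst

-- matching Nat positions of a plain line list
def pvMN : List String → List Nat
  | [] => []
  | l :: ls =>
    if PySem.Str.isIn "#if MICROPY_EMIT_NATIVE" l then 0 :: (pvMN ls).map (· + 1)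
    else (pvMN ls).map (· + 1)

-- B's pass, phrased as structural recursion with the counter
def pvGo (c : Int) : List String → List String
  | [] => []
  | l :: ls =>
    if PySem.Str.isIn "#if MICROPY_EMIT_NATIVE" l then
      (if c + 1 == 3 then
          PySem.Str.replace l "#if MICROPY_EMIT_NATIVE" "#if MICROPY_EMIT_NATIVE || 1"
        else l) :: pvGo (c + 1) ls
    else l :: pvGo c ls

lemma pvMN_cons (l : String) (ls : List String) :
    pvMN (l :: ls) =
      if PySem.Str.isIn "#if MICROPY_EMIT_NATIVE" l then 0 :: (pvMN ls).map (· + 1)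
      else (pvMN ls).map (· + 1) := rfl

lemma pvGo_cons (c : Int) (l : String) (ls : List String) :
    pvGo c (l :: ls) =
      if PySem.Str.isIn "#if MICROPY_EMIT_NATIVE" l then
        (if c + 1 == 3 then
            PySem.Str.replace l "#if MICROPY_EMIT_NATIVE" "#if MICROPY_EMIT_NATIVE || 1"
          else l) :: pvGo (c + 1) ls
      else l :: pvGo c ls := rfl

-- loop invariant for A: the todo list collects exactly the index at which the counter reaches 3
lemma pvLoopA_inv (ps : List (Int × String)) (todo : List (Int × String))
    (d : PySem.Dict String Int) (c : Nat) (hd : d.getD "native" 0 = (c : Int)) :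
    (ps.foldl pvStepA (todo, d)).1 =
      todo ++ (if c ≤ 2 then (((pvM ps).drop (2 - c)).take 1).map (fun i => (i, "native"))
               else []) := by
  induction ps generalizing todo d c with
  | nil => simp [pvM]
  | cons p ps ih =>
    by_cases hp : PySem.Str.isIn "#if MICROPY_EMIT_NATIVE" p.2
    · have hM : pvM (p :: ps) = p.1 :: pvM ps := by
        simp only [pvM, List.filter_cons, hp, if_pos]; simp
      have hd' : (d.insert "native" (d.getD "native" 0 + 1)).getD "native" 0 = ((c + 1 : Nat) : Int) := by
        rw [PySem.Dict.getD_insert_self, hd]; push_cast; ring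
      by_cases hc2 : c = 2
      · subst hc2
        have : pvStepA (todo, d) p = (todo ++ [(p.1, "native")], d.insert "native" (d.getD "native" 0 + 1)) := by
          have h3' : d.getD "native" 0 + 1 = (3 : Int) := by rw [hd]; norm_num
          simp [pvStepA, h3']
          simpa using hp
        rw [List.foldl_cons, this, ih _ _ _ hd', hM]
        norm_num
      · have : pvStepA (todo, d) p = (todo, d.insert "native" (d.getD "native" 0 + 1)) := by
          have hne' : ¬ (d.getD "native" 0 + 1 = (3 : Int)) := by
            rw [hd]; omega
          simp [pvStepA, hne']
          intro h
          simp [h] at hp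
        rw [List.foldl_cons, this, ih _ _ _ hd', hM]
        by_cases hc : c ≤ 2
        · have h1 : c + 1 ≤ 2 := by omega
          have h2 : 2 - c = (2 - (c + 1)) + 1 := by omega
          simp only [hc, h1, if_true]
          rw [h2, List.drop_succ_cons]
        · have h1 : ¬ c + 1 ≤ 2 := by omega
          simp [hc, h1]
    · have hM : pvM (p :: ps) = pvM ps := by
        simp only [pvM, List.filter_cons]
        rw [if_neg (by simpa using hp)]
      have : pvStepA (todo, d) p = (todo, d) := by
        simp only [pvStepA]; rw [if_neg hp]
      rw [List.foldl_cons, this, ih _ _ _ hd, hM]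

-- the whole A loop, from the empty dict
lemma pvLoopA (ps : List (Int × String)) :
    (ps.foldl pvStepA ([], PySem.Dict.empty)).1 =
      (((pvM ps).drop 2).take 1).map (fun i => (i, "native")) := by
  have := pvLoopA_inv ps [] PySem.Dict.empty 0 (by simp [pysem])
  simpa using this

-- B's foldl equals the structural pass pvGo
lemma pvLoopB (ls : List String) (out : List String) (c : Int) :
    (ls.foldl pvStepB (out, c)).1 = out ++ pvGo c ls := by
  induction ls generalizing out c with
  | nil => simp [pvGo]
  | cons l ls ih =>
    rw [List.foldl_cons, pvGo_cons]
    by_cases hp : PySem.Str.isIn "#if MICROPY_EMIT_NATIVE" l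
    · have hstep : pvStepB (out, c) l =
          (out ++ [if c + 1 == 3 then
              PySem.Str.replace l "#if MICROPY_EMIT_NATIVE" "#if MICROPY_EMIT_NATIVE || 1"
            else l], c + 1) := by
        simp only [pvStepB]; rw [if_pos hp]
      rw [hstep, ih, if_pos hp, List.append_assoc, List.singleton_append]
    · have hstep : pvStepB (out, c) l = (out ++ [l], c) := by
        simp only [pvStepB]; rw [if_neg hp]
      rw [hstep, ih, if_neg hp, List.append_assoc, List.singleton_append]

-- pvGo is the identity once three matches have been seen
lemma pvGo_ge3 (ls : List String) (c : Int) (hc : 3 ≤ c) : pvGo c ls = ls := by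
  induction ls generalizing c with
  | nil => rfl
  | cons l ls ih =>
    rw [pvGo_cons]
    by_cases hp : PySem.Str.isIn "#if MICROPY_EMIT_NATIVE" l
    · rw [if_pos hp, if_neg (show ¬ ((c + 1 == 3) = true) by simp only [beq_iff_eq]; omega),
        ih _ (by omega)]
    · rw [if_neg hp, ih _ hc]

-- A's enumerated match indices are pvMN shifted by the start
lemma pvM_enumerate (ls : List String) (s : Int) :
    pvM (PySem.List.enumerate ls s) = List.map (fun j : Nat => s + (j : Int)) (pvMN ls) := by
  induction ls generalizing s with
  | nil => simp [pvM, pvMN, PySem.List.enumerate_nil]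
  | cons l ls ih =>
    rw [PySem.List.enumerate_cons, pvMN_cons]
    by_cases hp : PySem.Str.isIn "#if MICROPY_EMIT_NATIVE" l
    · have hM : pvM ((s, l) :: PySem.List.enumerate ls (s + 1)) =
          s :: pvM (PySem.List.enumerate ls (s + 1)) := by
        simp only [pvM, List.filter_cons]
        rw [if_pos hp]; rfl
      rw [hM, ih, if_pos hp, List.map_cons, List.map_map]
      refine congrArg₂ (· :: ·) (by norm_num) (List.map_congr_left ?_)
      intro k _
      simp only [Function.comp_apply]
      push_cast; ring
    · have hM : pvM ((s, l) :: PySem.List.enumerate ls (s + 1)) =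
          pvM (PySem.List.enumerate ls (s + 1)) := by
        simp only [pvM, List.filter_cons]
        rw [if_neg hp]
      rw [hM, ih, if_neg hp, List.map_map]
      refine List.map_congr_left ?_
      intro k _
      simp only [Function.comp_apply]
      push_cast; ring

-- characterization of B's pass: with counter c ≤ 2 it patches the (3-c)-th matching line
lemma pvGo_char (ls : List String) (c : Nat) (hc : c ≤ 2) :
    pvGo (c : Int) ls =
      (match (pvMN ls).drop (2 - c) with
       | [] => ls
       | j :: _ =>
         ls.set j (PySem.Str.replace (ls.getD j "")
           "#if MICROPY_EMIT_NATIVE" "#if MICROPY_EMIT_NATIVE || 1")) := by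
  induction ls generalizing c with
  | nil => simp [pvGo, pvMN]
  | cons l ls ih =>
    rw [pvGo_cons, pvMN_cons]
    by_cases hp : PySem.Str.isIn "#if MICROPY_EMIT_NATIVE" l
    · rw [if_pos hp, if_pos hp]
      by_cases hc2 : c = 2
      · subst hc2
        rw [if_pos (show ((((2 : Nat) : Int)) + 1 == 3) = true by norm_num),
          pvGo_ge3 ls _ (by norm_num)]
        simp
      · have hlt : c + 1 ≤ 2 := by omega
        rw [if_neg (show ¬ (((c : Int)) + 1 == 3) = true by
              simp only [beq_iff_eq]; omega),
          show ((c : Nat) : Int) + 1 = (((c + 1 : Nat)) : Int) by push_cast; ring,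
          ih (c + 1) hlt,
          show 2 - c = (2 - (c + 1)) + 1 from by omega, List.drop_succ_cons,
          ← List.map_drop]
        cases hcase : (pvMN ls).drop (2 - (c + 1)) with
        | nil => simp
        | cons j t => simp
    · rw [if_neg hp, if_neg hp, ih c hc, ← List.map_drop]
      cases hcase : (pvMN ls).drop (2 - c) with
      | nil => simp
      | cons j t => simp

-- ===== VERDICT (by name: the statement is the Claim_ definition above) =====
theorem fix_objfun_spec : Claim_equal_fix_objfun := by
  intro data _
  unfold Spec_fix_objfun fix_objfun fix_objfun_alt
  match data with
  | none => rfl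
  | some d =>
    simp only
    set lines := (PySem.Str.split? d "\n").getD [] with hlines
    -- A side: reduce the first fold to the single third-match todo entry
    have hfoldA : ((PySem.List.enumerate lines).foldl
        (fun (st : List (Int × String) × PySem.Dict String Int) p =>
          if PySem.Str.isIn "#if MICROPY_EMIT_NATIVE" p.2 then
            let found := st.2.insert "native" (st.2.getD "native" 0 + 1)
            if found.getD "native" 0 == 3 then (st.1 ++ [(p.1, "native")], found)
            else (st.1, found)
          else st)
        ([], PySem.Dict.empty)).1 =
        (((pvM (PySem.List.enumerate lines)).drop 2).take 1).map (fun i => (i, "native")) :=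
      pvLoopA (PySem.List.enumerate lines)
    rw [hfoldA]
    -- B side: reduce the fold to pvGo 0 lines
    have hfoldB : (lines.foldl
        (fun (st : List String × Int) line =>
          if PySem.Str.isIn "#if MICROPY_EMIT_NATIVE" line then
            let seen := st.2 + 1
            let line := if seen == 3 then
                PySem.Str.replace line "#if MICROPY_EMIT_NATIVE" "#if MICROPY_EMIT_NATIVE || 1"
              else line
            (st.1 ++ [line], seen)
          else (st.1 ++ [line], st.2))
        ([], 0)).1 = pvGo 0 lines := pvLoopB lines [] 0
    rw [hfoldB]
    have hm : pvM (PySem.List.enumerate lines) = List.map (fun j : Nat => (j : Int)) (pvMN lines) := by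
      rw [pvM_enumerate lines 0]
      refine List.map_congr_left ?_
      intro k _; omega
    have hchar : pvGo 0 lines =
        (match (pvMN lines).drop 2 with
         | [] => lines
         | j :: _ =>
           lines.set j (PySem.Str.replace (lines.getD j "")
             "#if MICROPY_EMIT_NATIVE" "#if MICROPY_EMIT_NATIVE || 1")) := by
      have h := pvGo_char lines 0 (by norm_num)
      simpa using h
    rw [hm, hchar, ← List.map_drop]
    cases hcase : (pvMN lines).drop 2 with
    | nil =>
      rw [show PySem.List.sorted2 (List.map (fun i => (i, "native"))
          (List.take 1 (List.map (fun j : Nat => (j : Int)) ([] : List Nat))))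
          Prod.fst Prod.snd true = [] from rfl]
      simp
    | cons j t =>
      simp only [List.map_cons, List.take_succ_cons, List.take_zero, List.map_nil]
      have hs : PySem.List.sorted2 [(((j : Nat) : Int), "native")] Prod.fst Prod.snd true
          = [(((j : Nat) : Int), "native")] := rfl
      rw [hs]
      simp only [List.foldl_cons, List.foldl_nil]
      rw [if_pos (by rfl), PySem.List.pySetD_natCast, PySem.List.pyGetD_natCast]
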